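-- pv_equiv track=rewrite | github.com/yanzhenxing123/algorithms | 秋招笔试/美团/triplet_count_breakthrough.py | count_triplets_breakthrough
-- ===== SOURCE A (Python) =====
-- import bisect
--
-- def count_triplets_breakthrough(arr):
--     """
--     突破性优化版本：使用高级数据结构
--     时间复杂度：O(n log n)
--     """
--     n = len(arr)
--     count = 0
--
--     # 离散化
--     unique_vals = sorted(set(arr))
--     val_to_idx = {val: idx for idx, val in enumerate(unique_vals)}
--
--     # 对于每个位置j
--     for j in range(1, n - 1):
--         aj = arr[j]
--
--         # 收集左边大于aj的元素
--         left_greater = []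
--         for i in range(j):
--             if arr[i] > aj:
--                 left_greater.append(arr[i])
--
--         # 收集右边大于aj的元素并排序
--         right_greater = []
--         for k in range(j + 1, n):
--             if arr[k] > aj:
--                 right_greater.append(arr[k])
--
--         # 排序右边元素
--         right_greater.sort()
--
--         # 对于每个左边的元素ai
--         for ai in left_greater:
--             # 使用二分查找
--             count += bisect.bisect_left(right_greater, ai)
--
--     return count
-- ===== SOURCE B (Python) =====
-- def count_triplets_breakthrough(arr):
--     # For each rightmost index k, scan j < k keeping a running count of
--     # indices i < j with arr[i] > arr[k]; each j with arr[j] < arr[k]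
--     # contributes that running count.
--     n = len(arr)
--     count = 0
--     for k in range(n):
--         ak = arr[k]
--         cnt = 0
--         for j in range(k):
--             if arr[j] < ak:
--                 count += cnt
--             if arr[j] > ak:
--                 cnt += 1
--     return count
-- ===== Notes on version B (the rewrite author's own statement) =====
-- stated objective: faster
-- what changed: Replaced A's per-middle-element filter/sort/binary-search machinery (plus dead discretization code) by a two-level loop that, for each rightmost index k, scans j<k keeping a running count of earlier elements greater than arr[k].
import Mathlib
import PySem

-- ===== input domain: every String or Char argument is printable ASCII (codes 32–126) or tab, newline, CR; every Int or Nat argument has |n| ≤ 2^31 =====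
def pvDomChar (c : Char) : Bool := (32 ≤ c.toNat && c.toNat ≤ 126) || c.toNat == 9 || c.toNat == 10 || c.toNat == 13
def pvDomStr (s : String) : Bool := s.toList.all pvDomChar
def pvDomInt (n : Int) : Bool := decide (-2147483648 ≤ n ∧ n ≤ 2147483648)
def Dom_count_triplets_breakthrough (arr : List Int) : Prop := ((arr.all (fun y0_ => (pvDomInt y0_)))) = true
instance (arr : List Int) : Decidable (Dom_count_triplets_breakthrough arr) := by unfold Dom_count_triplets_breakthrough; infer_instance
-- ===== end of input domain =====

-- B replaces A's per-middle-element filter/sort/binary-search machinery (and dead discretization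
-- code) by a two-level prefix-counting loop over the rightmost index; objective: faster.

-- ===== PORT A =====
def count_triplets_breakthrough (arr : List Int) : Int :=
  let n : Int := PySem.List.len arr
  let unique_vals := PySem.List.sorted (PySem.Set.ofList arr) (fun x => x)
  let _val_to_idx : PySem.Dict Int Int :=
    (PySem.List.enumerate unique_vals).foldl (fun d p => PySem.Dict.insert d p.2 p.1) PySem.Dict.empty
  (PySem.List.pyRange 1 (n - 1)).foldl (fun count j =>
    let aj := PySem.List.pyGetD arr j 0
    let left_greater := (PySem.List.pyRange 0 j).foldl
      (fun acc i => if PySem.List.pyGetD arr i 0 > aj then acc ++ [PySem.List.pyGetD arr i 0] else acc) []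
    let right_greater := (PySem.List.pyRange (j + 1) n).foldl
      (fun acc k => if PySem.List.pyGetD arr k 0 > aj then acc ++ [PySem.List.pyGetD arr k 0] else acc) []
    let right_greater := PySem.List.sorted right_greater (fun x => x)
    left_greater.foldl (fun count ai => count + (PySem.List.bisectLeft right_greater ai : Int)) count) 0

-- ===== PORT B =====
-- the Python loop carries two accumulators (count, cnt); ported as a pair-state fold
def count_triplets_breakthrough_alt (arr : List Int) : Int :=
  let n : Int := PySem.List.len arr
  (PySem.List.pyRange 0 n).foldl (fun count k =>
    let ak := PySem.List.pyGetD arr k 0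
    ((PySem.List.pyRange 0 k).foldl (fun s j =>
        let s := if PySem.List.pyGetD arr j 0 < ak then (s.1 + s.2, s.2) else s
        if PySem.List.pyGetD arr j 0 > ak then (s.1, s.2 + 1) else s) (count, 0)).1) 0

-- ===== PRECONDITION & SPEC =====
def Spec_count_triplets_breakthrough (arr : List Int) (out : Int) : Prop := out = count_triplets_breakthrough_alt arr
instance (arr : List Int) (out : Int) : Decidable (Spec_count_triplets_breakthrough arr out) := by unfold Spec_count_triplets_breakthrough; infer_instance

-- ===== CLAIM (what is proved, stated in full; the proofs are below) =====
def Claim_equal_count_triplets_breakthrough : Prop := ∀ (arr : List Int), Dom_count_triplets_breakthrough arr → Spec_count_triplets_breakthrough arr (count_triplets_breakthrough arr)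

-- ===== LEMMAS AND PROOFS =====

-- value at index i (all indices used below are in range, so the default never matters)
def pvG (arr : List Int) (i : Int) : Int := PySem.List.pyGetD arr i 0

-- number of valid right partners k for middle j and left value arr[i]
def pvInner (arr : List Int) (j i : Int) : Int :=
  ((PySem.List.pyRange (j + 1) (PySem.List.len arr)).countP
    (fun k => decide (pvG arr j < pvG arr k ∧ pvG arr k < pvG arr i)) : Int)

-- contribution of middle element j, grouped as in both programs' common value
def pvSumJ (arr : List Int) (j : Int) : Int :=
  ((PySem.List.pyRange 0 j).map (pvInner arr j)).sum

-- A's contribution of middle element j (left indices filtered, values binary-searched)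
def pvSA (arr : List Int) (j : Int) : Int :=
  (((PySem.List.pyRange 0 j).filter (fun i => decide (pvG arr j < pvG arr i))).map
    (fun i => (PySem.List.bisectLeft
      (PySem.List.sorted
        (((PySem.List.pyRange (j + 1) (PySem.List.len arr)).filter
            (fun k => decide (pvG arr j < pvG arr k))).map (pvG arr))
        (fun x => x))
      (pvG arr i) : Int))).sum

-- B's contribution of rightmost element k
def pvT (arr : List Int) (k : Int) : Int :=
  ∑ j ∈ Finset.range k.toNat, (if pvG arr (j : Int) < pvG arr k then
      (∑ i ∈ Finset.range j, if pvG arr k < pvG arr (i : Int) then (1 : Int) else 0) else 0)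

lemma bisect_eq_countP (l : List Int) (x : Int) (h : l.Pairwise (· ≤ ·)) :
    PySem.List.bisectLeft l x = l.countP (fun y => decide (y < x)) := by
  obtain ⟨hb, hlt, hge⟩ := PySem.List.bisectLeft_spec l x h
  set b := PySem.List.bisectLeft l x with hbdef
  have hsplit : l.countP (fun y => decide (y < x)) = (l.take b ++ l.drop b).countP (fun y => decide (y < x)) := by
    rw [List.take_append_drop]
  rw [hsplit, List.countP_append]
  have htake : (l.take b).countP (fun y => decide (y < x)) = (l.take b).length := by
    apply List.countP_eq_length.2
    intro a ha
    rw [List.mem_iff_getElem] at ha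
    obtain ⟨i, hi, rfl⟩ := ha
    have hib : i < b := by
      have := hi; simp [List.length_take] at this; omega
    have hil : i < l.length := by
      have := hi; simp [List.length_take] at this; omega
    have := hlt i hil hib
    simp [List.getElem_take]
    exact this
  have hdrop : (l.drop b).countP (fun y => decide (y < x)) = 0 := by
    apply List.countP_eq_zero.2
    intro a ha
    rw [List.mem_iff_getElem] at ha
    obtain ⟨i, hi, rfl⟩ := ha
    have hil : b + i < l.length := by
      have := hi; simp [List.length_drop] at this; omega
    have hbi : b ≤ b + i := Nat.le_add_right b i
    have := hge (b + i) hil hbi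
    simp [List.getElem_drop]
    omega
  rw [htake, hdrop, List.length_take]
  omega

lemma pvBisect_eq_pvInner (arr : List Int) (j i : Int) :
    (PySem.List.bisectLeft
      (PySem.List.sorted
        (((PySem.List.pyRange (j + 1) (PySem.List.len arr)).filter
            (fun k => decide (pvG arr j < pvG arr k))).map (pvG arr))
        (fun x => x))
      (pvG arr i) : Int) = pvInner arr j i := by
  set R := ((PySem.List.pyRange (j + 1) (PySem.List.len arr)).filter
      (fun k => decide (pvG arr j < pvG arr k))).map (pvG arr) with hR
  have hpw : (PySem.List.sorted R (fun x => x)).Pairwise (· ≤ ·) := by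
    have := PySem.List.sorted_pairwise (xs := R) (key := fun x => x)
    simpa using this
  rw [bisect_eq_countP _ _ hpw]
  have hperm : (PySem.List.sorted R (fun x => x)).Perm R := PySem.List.sorted_perm R (fun x => x) false
  rw [hperm.countP_eq]
  rw [hR, List.countP_map, List.countP_filter]
  unfold pvInner
  congr 1
  apply List.countP_congr
  intro k _
  simp [Function.comp]
  tauto

lemma sum_map_filter_of_zero (l : List Int) (p : Int → Bool) (f : Int → Int)
    (h : ∀ i ∈ l, p i = false → f i = 0) :
    ((l.filter p).map f).sum = (l.map f).sum := by
  induction l with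
  | nil => simp
  | cons a t ih =>
    by_cases hp : p a = true
    · simp [hp]
      exact ih (fun i hi hpi => h i (List.mem_cons_of_mem a hi) hpi)
    · have hpa : p a = false := by simpa using hp
      simp [hpa, h a (List.mem_cons_self) hpa]
      exact ih (fun i hi hpi => h i (List.mem_cons_of_mem a hi) hpi)

lemma pvSA_eq_pvSumJ (arr : List Int) (j : Int) : pvSA arr j = pvSumJ arr j := by
  unfold pvSA pvSumJ
  have hrw : ∀ i : Int,
      (PySem.List.bisectLeft
        (PySem.List.sorted
          (((PySem.List.pyRange (j + 1) (PySem.List.len arr)).filter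
              (fun k => decide (pvG arr j < pvG arr k))).map (pvG arr))
          (fun x => x))
        (pvG arr i) : Int) = pvInner arr j i := fun i => pvBisect_eq_pvInner arr j i
  calc (((PySem.List.pyRange 0 j).filter (fun i => decide (pvG arr j < pvG arr i))).map
          (fun i => (PySem.List.bisectLeft
            (PySem.List.sorted
              (((PySem.List.pyRange (j + 1) (PySem.List.len arr)).filter
                  (fun k => decide (pvG arr j < pvG arr k))).map (pvG arr))
              (fun x => x))
            (pvG arr i) : Int))).sum
      = (((PySem.List.pyRange 0 j).filter (fun i => decide (pvG arr j < pvG arr i))).map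
          (pvInner arr j)).sum := by
        congr 1
        exact List.map_congr_left (fun i _ => hrw i)
    _ = ((PySem.List.pyRange 0 j).map (pvInner arr j)).sum := by
        apply sum_map_filter_of_zero
        intro i _ hfalse
        unfold pvInner
        have : ∀ k, (decide (pvG arr j < pvG arr k ∧ pvG arr k < pvG arr i)) = false := by
          intro k
          simp at hfalse ⊢
          intro h1
          omega
        rw [List.countP_eq_zero.2 (fun k _ => by simp [this k])]
        simp

lemma A_eq_sum (arr : List Int) :
    count_triplets_breakthrough arr =
      ((PySem.List.pyRange 1 (PySem.List.len arr - 1)).map (pvSA arr)).sum := by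
  unfold count_triplets_breakthrough
  simp only [PySem.List.foldl_append_ite, List.nil_append, PySem.List.foldl_add,
    List.map_map, zero_add]
  congr 1

lemma pvSumJ_zero (arr : List Int) : pvSumJ arr 0 = 0 := by
  unfold pvSumJ
  simp [PySem.List.pyRange_one_eq_nil]

lemma pvSumJ_last (arr : List Int) (j : Int) (hj : PySem.List.len arr ≤ j + 1) :
    pvSumJ arr j = 0 := by
  unfold pvSumJ pvInner
  have : PySem.List.pyRange (j + 1) (PySem.List.len arr) = [] :=
    PySem.List.pyRange_one_eq_nil hj
  rw [this]
  simp

-- A equals the sum of pvSumJ over the FULL index range (the two missing endpoints contribute 0)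
lemma A_eq_full (arr : List Int) :
    count_triplets_breakthrough arr =
      ((PySem.List.pyRange 0 (PySem.List.len arr)).map (pvSumJ arr)).sum := by
  rw [A_eq_sum]
  have hmap : ∀ r : List Int, (r.map (pvSA arr)).sum = (r.map (pvSumJ arr)).sum := by
    intro r; congr 1; exact List.map_congr_left (fun j _ => pvSA_eq_pvSumJ arr j)
  rw [hmap]
  have hn : PySem.List.len arr = (arr.length : Int) := by simp [PySem.List.len_eq]
  rcases arr with _ | ⟨a, t⟩
  · simp [PySem.List.pyRange_one_eq_nil]
  · rcases t with _ | ⟨b, u⟩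
    · rw [hn]
      have h01 : PySem.List.pyRange 0 1 = [0] := by decide
      simp [PySem.List.pyRange_one_eq_nil, h01, pvSumJ_zero]
    · set n : Int := PySem.List.len (a :: b :: u) with hndef
      have hn2 : (2 : Int) ≤ n := by rw [hn]; simp; omega
      have hdecomp : PySem.List.pyRange 0 n = 0 :: (PySem.List.pyRange 1 (n - 1) ++ [n - 1]) := by
        rw [PySem.List.pyRange_one_cons (by omega)]
        congr 1
        have : n = (n - 1) + 1 := by omega
        rw [this, PySem.List.pyRange_one_succ_right (by omega)]
        simp
      rw [hdecomp]
      simp only [List.map_cons, List.map_append, List.sum_cons, List.sum_append,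
        List.map_nil, List.sum_nil]
      rw [pvSumJ_zero, pvSumJ_last (a :: b :: u) (n - 1) (by omega)]
      ring

-- bridge: a sum of f over pyRange a (a+m) is a Finset.range sum
lemma sum_map_pyRange (f : Int → Int) (a : Int) (m : Nat) :
    ((PySem.List.pyRange a (a + (m : Int))).map f).sum = ∑ t ∈ Finset.range m, f (a + (t : Int)) := by
  induction m with
  | zero => simp [PySem.List.pyRange_one_eq_nil]
  | succ m ih =>
    have hcast : a + ((m + 1 : Nat) : Int) = (a + (m : Int)) + 1 := by push_cast; ring
    rw [hcast, PySem.List.pyRange_one_succ_right (by omega : a ≤ a + (m : Int))]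
    rw [List.map_append, List.sum_append, ih, Finset.sum_range_succ]
    simp

lemma sum_map_pyRange0 (f : Int → Int) (m : Nat) :
    ((PySem.List.pyRange 0 (m : Int)).map f).sum = ∑ t ∈ Finset.range m, f (t : Int) := by
  have := sum_map_pyRange f 0 m
  simpa using this

-- invariant of B's inner loop: running pair (count, cnt) after scanning j = 0..m-1
lemma B_inner (arr : List Int) (ak : Int) (m : Nat) (c0 g0 : Int) :
    (PySem.List.pyRange 0 (m : Int)).foldl (fun s j =>
        let s := if PySem.List.pyGetD arr j 0 < ak then (s.1 + s.2, s.2) else s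
        if PySem.List.pyGetD arr j 0 > ak then (s.1, s.2 + 1) else s) (c0, g0)
    = (c0 + ∑ j ∈ Finset.range m, (if pvG arr (j : Int) < ak then
          g0 + (∑ i ∈ Finset.range j, if ak < pvG arr (i : Int) then (1 : Int) else 0) else 0),
       g0 + ∑ j ∈ Finset.range m, if ak < pvG arr (j : Int) then (1 : Int) else 0) := by
  induction m with
  | zero => simp [PySem.List.pyRange_one_eq_nil]
  | succ m ih =>
    have hcast : ((m + 1 : Nat) : Int) = (m : Int) + 1 := by push_cast; ring
    rw [hcast, PySem.List.pyRange_one_succ_right (by omega : (0 : Int) ≤ (m : Int))]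
    rw [List.foldl_append, ih]
    simp only [List.foldl_cons, List.foldl_nil, Finset.sum_range_succ]
    have hg : PySem.List.pyGetD arr (m : Int) 0 = pvG arr (m : Int) := rfl
    by_cases h1 : pvG arr (m : Int) < ak
    · have h2 : ¬ (pvG arr (m : Int) > ak) := by omega
      simp only [hg, if_pos h1, if_neg h2]
      rw [Prod.mk.injEq]
      constructor <;> ring
    · by_cases h2 : pvG arr (m : Int) > ak
      · simp only [hg, if_neg h1, if_pos h2]
        rw [Prod.mk.injEq]
        constructor <;> ring
      · simp only [hg, if_neg h1, if_neg h2]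
        rw [Prod.mk.injEq]
        constructor <;> ring

-- B as a Finset sum of pvT over the rightmost index
lemma B_eq_finset (arr : List Int) :
    count_triplets_breakthrough_alt arr = ∑ k ∈ Finset.range arr.length, pvT arr (k : Int) := by
  unfold count_triplets_breakthrough_alt
  rw [PySem.List.foldl_congr_mem _ _ (fun count k => count + pvT arr k) 0 ?hcong]
  case hcong =>
    intro acc k hk
    have hk0 : 0 ≤ k := (PySem.List.mem_pyRange_one.1 hk).1
    have hkn : (k.toNat : Int) = k := Int.toNat_of_nonneg hk0
    have := B_inner arr (PySem.List.pyGetD arr k 0) k.toNat acc 0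
    rw [hkn] at this
    simp only [this]
    unfold pvT pvG
    simp
  rw [PySem.List.foldl_add]
  have hn : PySem.List.len arr = ((arr.length : Nat) : Int) := by simp [PySem.List.len_eq]
  rw [hn, sum_map_pyRange0 (pvT arr) arr.length]
  simp

-- pvInner over the full right range, as a guarded Finset sum
lemma pvInner_eq (arr : List Int) (jn : Nat) (i : Int) (hj : jn < arr.length) :
    pvInner arr (jn : Int) i = ∑ k ∈ Finset.range arr.length,
      (if jn < k then (if pvG arr (jn : Int) < pvG arr (k : Int) ∧ pvG arr (k : Int) < pvG arr i
        then (1 : Int) else 0) else 0) := by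
  unfold pvInner
  rw [← PySem.List.sum_map_ite_one_zero]
  have hlen : (PySem.List.len arr) = ((jn : Int) + 1) + ((arr.length - (jn + 1) : Nat) : Int) := by
    simp [PySem.List.len_eq]; omega
  rw [hlen, sum_map_pyRange _ ((jn : Int) + 1) (arr.length - (jn + 1))]
  have hfil : (Finset.range arr.length).filter (fun k => jn < k) = Finset.Ico (jn + 1) arr.length := by
    ext x; simp [Finset.mem_filter, Finset.mem_Ico]; omega
  have hr : (∑ k ∈ Finset.range arr.length,
      (if jn < k then (if pvG arr (jn : Int) < pvG arr (k : Int) ∧ pvG arr (k : Int) < pvG arr i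
        then (1 : Int) else 0) else 0))
      = ∑ k ∈ Finset.Ico (jn + 1) arr.length,
        (if pvG arr (jn : Int) < pvG arr (k : Int) ∧ pvG arr (k : Int) < pvG arr i
          then (1 : Int) else 0) := by
    rw [← Finset.sum_filter, hfil]
  rw [hr, Finset.sum_Ico_eq_sum_range]
  apply Finset.sum_congr rfl
  intro t _
  have hc : ((jn : Int) + 1 + (t : Int)) = ((jn + 1 + t : Nat) : Int) := by push_cast; ring
  rw [hc]
  simp

-- pvSumJ in Finset form, with the right index pulled outermost
lemma pvSumJ_eq (arr : List Int) (jn : Nat) (hj : jn < arr.length) :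
    pvSumJ arr (jn : Int) = ∑ k ∈ Finset.range arr.length,
      (if jn < k then (if pvG arr (jn : Int) < pvG arr (k : Int) then
        (∑ i ∈ Finset.range jn, if pvG arr (k : Int) < pvG arr (i : Int) then (1 : Int) else 0)
        else 0) else 0) := by
  unfold pvSumJ
  rw [sum_map_pyRange0 (pvInner arr (jn : Int)) jn]
  calc ∑ i ∈ Finset.range jn, pvInner arr (jn : Int) (i : Int)
      = ∑ i ∈ Finset.range jn, ∑ k ∈ Finset.range arr.length,
          (if jn < k then (if pvG arr (jn : Int) < pvG arr (k : Int) ∧ pvG arr (k : Int) < pvG arr (i : Int)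
            then (1 : Int) else 0) else 0) :=
        Finset.sum_congr rfl (fun i _ => pvInner_eq arr jn (i : Int) hj)
    _ = ∑ k ∈ Finset.range arr.length, ∑ i ∈ Finset.range jn,
          (if jn < k then (if pvG arr (jn : Int) < pvG arr (k : Int) ∧ pvG arr (k : Int) < pvG arr (i : Int)
            then (1 : Int) else 0) else 0) := Finset.sum_comm
    _ = _ := by
        apply Finset.sum_congr rfl
        intro k _
        by_cases hjk : jn < k
        · simp only [if_pos hjk]
          by_cases hP : pvG arr (jn : Int) < pvG arr (k : Int)
          · simp [hP]
          · simp [hP]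
        · simp [hjk]

-- ===== VERDICT (by name: the statement is the Claim_ definition above) =====
theorem count_triplets_breakthrough_spec : Claim_equal_count_triplets_breakthrough := by
  intro arr _
  unfold Spec_count_triplets_breakthrough
  rw [A_eq_full, B_eq_finset]
  have hn : PySem.List.len arr = ((arr.length : Nat) : Int) := by simp [PySem.List.len_eq]
  rw [hn, sum_map_pyRange0 (pvSumJ arr) arr.length]
  calc ∑ j ∈ Finset.range arr.length, pvSumJ arr (j : Int)
      = ∑ j ∈ Finset.range arr.length, ∑ k ∈ Finset.range arr.length,
          (if j < k then (if pvG arr (j : Int) < pvG arr (k : Int) then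
            (∑ i ∈ Finset.range j, if pvG arr (k : Int) < pvG arr (i : Int) then (1 : Int) else 0)
            else 0) else 0) :=
        Finset.sum_congr rfl (fun j hj => pvSumJ_eq arr j (Finset.mem_range.1 hj))
    _ = ∑ k ∈ Finset.range arr.length, ∑ j ∈ Finset.range arr.length,
          (if j < k then (if pvG arr (j : Int) < pvG arr (k : Int) then
            (∑ i ∈ Finset.range j, if pvG arr (k : Int) < pvG arr (i : Int) then (1 : Int) else 0)
            else 0) else 0) := Finset.sum_comm
    _ = ∑ k ∈ Finset.range arr.length, pvT arr (k : Int) := by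
        apply Finset.sum_congr rfl
        intro k hk
        have hkn : k < arr.length := Finset.mem_range.1 hk
        rw [← Finset.sum_filter]
        have hfil : (Finset.range arr.length).filter (fun j => j < k) = Finset.range k := by
          ext x; simp [Finset.mem_filter]; omega
        rw [hfil]
        unfold pvT
        simp
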